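-- pv_equiv track=rewrite | github.com/yingzhuo1994/AlgoExpert | assessments/LongestStreakOfAdjacentOnes.py | longestStreakOfAdjacentOnes
-- ===== SOURCE A (Python) =====
-- def longestStreakOfAdjacentOnes(array):
--     stack = []
--     for i, num in enumerate(array):
--         if num == 0:
--             stack.append(i)
--
--     possibleIdx = -1
--     largestLength = 0
--     for i, idx in enumerate(stack):
--         if i == 0:
--             front = idx
--         else:
--             front = idx - stack[i-1] - 1
--         if i == len(stack) - 1:
--             back = len(array) - idx - 1
--         else:
--             back = stack[i+1] - idx - 1
--         length = front + 1 + back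
--         if length > largestLength:
--             largestLength = length
--             possibleIdx = idx
--     return possibleIdx
-- ===== SOURCE B (Python) =====
-- def longestStreakOfAdjacentOnes(array):
--     # One pass, O(1) extra space: finalize each zero's streak when the next zero
--     # (or the end of the array) is reached; strict '>' keeps the leftmost best.
--     largestLength = 0
--     possibleIdx = -1
--     lastZero = -1
--     front = 0
--     for i, num in enumerate(array):
--         if num == 0:
--             if lastZero >= 0:
--                 length = front + 1 + (i - lastZero - 1)
--                 if length > largestLength:
--                     largestLength = length
--                     possibleIdx = lastZero
--             front = i - lastZero - 1
--             lastZero = i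
--     if lastZero >= 0:
--         length = front + 1 + (len(array) - lastZero - 1)
--         if length > largestLength:
--             possibleIdx = lastZero
--     return possibleIdx
-- ===== Notes on version B (the rewrite author's own statement) =====
-- stated objective: alternative
-- what changed: Replaced A's two-pass design (collect all zero indices into a stack, then score each zero via stack[i-1]/stack[i+1] neighbor lookups) with a single pass over the array that keeps O(1) state (last zero seen and the gap before it) and finalizes each zero's streak when the next zero or the end is reached.
import Mathlib
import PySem

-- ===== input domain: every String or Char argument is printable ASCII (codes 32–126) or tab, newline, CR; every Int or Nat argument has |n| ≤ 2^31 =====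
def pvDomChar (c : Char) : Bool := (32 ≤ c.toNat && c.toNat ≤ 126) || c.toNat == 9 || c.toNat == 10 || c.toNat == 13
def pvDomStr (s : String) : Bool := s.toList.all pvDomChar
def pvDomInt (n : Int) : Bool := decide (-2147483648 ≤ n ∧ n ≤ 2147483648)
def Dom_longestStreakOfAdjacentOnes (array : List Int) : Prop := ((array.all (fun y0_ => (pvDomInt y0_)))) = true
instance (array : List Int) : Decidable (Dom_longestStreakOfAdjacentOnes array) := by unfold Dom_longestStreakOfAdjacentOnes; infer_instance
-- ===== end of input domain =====

-- B replaces A's two-pass zero-index-stack with a single pass over the array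
-- keeping O(1) state (objective: alternative; same asymptotic cost).


-- ===== PORT A =====
-- A: first loop collects the indices of the zeros into `stack`; second loop
-- scores each zero by its surrounding gaps using stack[i-1]/stack[i+1].
-- Those accesses are guarded by the i == 0 / i == len(stack)-1 branches, so
-- the pyGetD defaults are never reached; the port is exact.
def longestStreakOfAdjacentOnes (array : List Int) : Int :=
  let stack : List Int :=
    (PySem.List.enumerate array 0).foldl
      (fun st p => if p.2 == 0 then st ++ [p.1] else st) []
  let res : Int × Int :=
    (PySem.List.enumerate stack 0).foldl
      (fun acc p =>
        let i := p.1
        let idx := p.2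
        let front := if i == 0 then idx else idx - PySem.List.pyGetD stack (i - 1) 0 - 1
        let back := if i == (stack.length : Int) - 1 then (array.length : Int) - idx - 1
                    else PySem.List.pyGetD stack (i + 1) 0 - idx - 1
        let length := front + 1 + back
        if length > acc.2 then (idx, length) else acc)
      (-1, 0)
  res.1

-- ===== PORT B =====
-- B: one pass; each zero's streak is finalized when the next zero (or the end)
-- is reached.  State: (largestLength, possibleIdx, lastZero, front).
def longestStreakOfAdjacentOnes_alt (array : List Int) : Int :=
  let st : Int × Int × Int × Int :=
    (PySem.List.enumerate array 0).foldl
      (fun st p =>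
        if p.2 == 0 then
          let s1 :=
            if st.2.2.1 ≥ 0 then
              let length := st.2.2.2 + 1 + (p.1 - st.2.2.1 - 1)
              if length > st.1 then (length, st.2.2.1) else (st.1, st.2.1)
            else (st.1, st.2.1)
          (s1.1, s1.2, p.1, p.1 - st.2.2.1 - 1)
        else st)
      (0, -1, -1, 0)
  if st.2.2.1 ≥ 0 then
    let length := st.2.2.2 + 1 + ((array.length : Int) - st.2.2.1 - 1)
    if length > st.1 then st.2.2.1 else st.2.1
  else st.2.1

-- ===== PRECONDITION & SPEC =====
def Spec_longestStreakOfAdjacentOnes (array : List Int) (out : Int) : Prop := out = longestStreakOfAdjacentOnes_alt array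
instance (array : List Int) (out : Int) : Decidable (Spec_longestStreakOfAdjacentOnes array out) := by unfold Spec_longestStreakOfAdjacentOnes; infer_instance

-- ===== CLAIM (what is proved, stated in full; the proofs are below) =====
def Claim_equal_longestStreakOfAdjacentOnes : Prop := ∀ (array : List Int), Dom_longestStreakOfAdjacentOnes array → Spec_longestStreakOfAdjacentOnes array (longestStreakOfAdjacentOnes array)

-- ===== LEMMAS AND PROOFS =====

-- zero indices of a list, offset s
def zIdx (a : List Int) (s : Int) : List Int :=
  match a with
  | [] => []
  | x :: xs => if x = 0 then s :: zIdx xs (s + 1) else zIdx xs (s + 1)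

-- abstract form of A's second loop: structural recursion on the zero list;
-- acc = (possibleIdx, largestLength)
def goA (n prev : Int) (zs : List Int) (acc : Int × Int) : Int × Int :=
  match zs with
  | [] => acc
  | z :: rest =>
    let back := match rest with | [] => n - z - 1 | z' :: _ => z' - z - 1
    let len := (z - prev - 1) + 1 + back
    goA n z rest (if len > acc.2 then (z, len) else acc)

-- abstract form of B's loop, on the zero list
def goB (zs : List Int) (st : Int × Int × Int × Int) : Int × Int × Int × Int :=
  match zs with
  | [] => st
  | z :: rest =>
    goB rest
      (let s1 :=
        if st.2.2.1 ≥ 0 then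
          let length := st.2.2.2 + 1 + (z - st.2.2.1 - 1)
          if length > st.1 then (length, st.2.2.1) else (st.1, st.2.1)
        else (st.1, st.2.1)
       (s1.1, s1.2, z, z - st.2.2.1 - 1))

-- B's final step
def finB (n : Int) (st : Int × Int × Int × Int) : Int :=
  if st.2.2.1 ≥ 0 then
    if st.2.2.2 + 1 + (n - st.2.2.1 - 1) > st.1 then st.2.2.1 else st.2.1
  else st.2.1

theorem zIdx_le (a : List Int) : ∀ (s z : Int), z ∈ zIdx a s → s ≤ z := by
  induction a with
  | nil => intro s z h; simp [zIdx] at h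
  | cons x xs ih =>
    intro s z h
    simp only [zIdx] at h
    split at h
    · rcases List.mem_cons.mp h with h | h
      · omega
      · have := ih (s + 1) z h; omega
    · have := ih (s + 1) z h; omega

theorem stack_eq (a : List Int) : ∀ (s : Int) (st : List Int),
    (PySem.List.enumerate a s).foldl
      (fun st p => if p.2 == 0 then st ++ [p.1] else st) st = st ++ zIdx a s := by
  induction a with
  | nil => intro s st; simp [PySem.List.enumerate_nil, zIdx]
  | cons x xs ih =>
    intro s st
    rw [PySem.List.enumerate_cons]
    simp only [List.foldl_cons]
    by_cases hx : x = 0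
    · simp only [hx, beq_self_eq_true, if_true]
      rw [ih]
      simp [zIdx, List.append_assoc]
    · have hb : (x == 0) = false := beq_eq_false_iff_ne.mpr hx
      simp only [hb, Bool.false_eq_true, if_false]
      rw [ih]
      simp [zIdx, hx]

theorem bfold_eq (a : List Int) : ∀ (s : Int) (st : Int × Int × Int × Int),
    (PySem.List.enumerate a s).foldl
      (fun st p =>
        if p.2 == 0 then
          let s1 :=
            if st.2.2.1 ≥ 0 then
              let length := st.2.2.2 + 1 + (p.1 - st.2.2.1 - 1)
              if length > st.1 then (length, st.2.2.1) else (st.1, st.2.1)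
            else (st.1, st.2.1)
          (s1.1, s1.2, p.1, p.1 - st.2.2.1 - 1)
        else st) st = goB (zIdx a s) st := by
  induction a with
  | nil => intro s st; simp [PySem.List.enumerate_nil, zIdx, goB]
  | cons x xs ih =>
    intro s st
    rw [PySem.List.enumerate_cons]
    simp only [List.foldl_cons]
    by_cases hx : x = 0
    · simp only [hx, beq_self_eq_true, if_true, zIdx, goB, ih]
    · have : (x == 0) = false := beq_eq_false_iff_ne.mpr hx
      simp only [this, Bool.false_eq_true, if_false, zIdx, if_neg hx, ih]

theorem afold_eq (stack : List Int) (n : Int) :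
    ∀ (m k : Nat), k + m = stack.length → ∀ (acc : Int × Int),
    (PySem.List.enumerate (stack.drop k) (k : Int)).foldl
      (fun acc p =>
        let i := p.1
        let idx := p.2
        let front := if i == 0 then idx else idx - PySem.List.pyGetD stack (i - 1) 0 - 1
        let back := if i == (stack.length : Int) - 1 then n - idx - 1
                    else PySem.List.pyGetD stack (i + 1) 0 - idx - 1
        let length := front + 1 + back
        if length > acc.2 then (idx, length) else acc) acc
    = goA n (if k = 0 then -1 else stack.getD (k - 1) 0) (stack.drop k) acc := by
  intro m
  induction m with
  | zero =>
    intro k h acc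
    have hk : k = stack.length := by omega
    subst hk
    simp [List.drop_length, PySem.List.enumerate_nil, goA]
  | succ m ih =>
    intro k h acc
    have hk : k < stack.length := by omega
    rw [List.drop_eq_getElem_cons hk, PySem.List.enumerate_cons, List.foldl_cons]
    have hs : (k : Int) + 1 = ((k + 1 : Nat) : Int) := by push_cast; ring
    rw [hs, ih (k + 1) (by omega)]
    rw [if_neg (by omega : ¬ (k + 1 = 0))]
    have hgk : stack.getD (k + 1 - 1) 0 = stack[k] := by
      simp [List.getD_eq_getElem?_getD, List.getElem?_eq_getElem hk]
    rw [hgk]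
    conv_rhs => rw [show stack[k] :: stack.drop (k + 1) = stack[k] :: stack.drop (k + 1) from rfl]
    simp only [goA]
    congr 1
    -- the one loop step equals goA's head step
    have hfront : (if ((k : Int) == 0) = true then stack[k]
        else stack[k] - PySem.List.pyGetD stack ((k : Int) - 1) 0 - 1)
        = stack[k] - (if k = 0 then -1 else stack.getD (k - 1) 0) - 1 := by
      by_cases h0 : k = 0
      · subst h0; simp
      · have h1 : ((k : Int) == 0) = false := by
          simp [Int.natCast_eq_zero]; omega
        have h2 : (k : Int) - 1 = ((k - 1 : Nat) : Int) := by omega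
        rw [h1, if_neg h0, h2, PySem.List.pyGetD_natCast]
        simp
    have hback : (if ((k : Int) == (stack.length : Int) - 1) = true then n - stack[k] - 1
        else PySem.List.pyGetD stack ((k : Int) + 1) 0 - stack[k] - 1)
        = (match stack.drop (k + 1) with
           | [] => n - stack[k] - 1
           | z' :: _ => z' - stack[k] - 1) := by
      by_cases hl : k = stack.length - 1
      · have hd : stack.drop (k + 1) = [] := by
          apply List.drop_eq_nil_of_le; omega
        have hc : ((k : Int) == (stack.length : Int) - 1) = true := by
          simp; omega
        rw [hc, hd]
        rfl
      · have hk1 : k + 1 < stack.length := by omega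
        have hd : stack.drop (k + 1) = stack[k + 1] :: stack.drop (k + 2) :=
          List.drop_eq_getElem_cons hk1
        have hc : ((k : Int) == (stack.length : Int) - 1) = false := by
          simp; omega
        rw [hc, hd, hs, PySem.List.pyGetD_natCast]
        simp [List.getD_eq_getElem?_getD, List.getElem?_eq_getElem hk1]
    simp only [hfront, hback]
  

theorem corr (n : Int) (zs : List Int) : ∀ (z pp best idx : Int), 0 ≤ z →
    (∀ y ∈ zs, 0 ≤ y) →
    (goA n pp (z :: zs) (idx, best)).1 = finB n (goB zs (best, idx, z, z - pp - 1)) := by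
  induction zs with
  | nil =>
    intro z pp best idx hz _
    simp only [goA, goB, finB]
    split_ifs with h1 <;> simp_all
  | cons z' rest ih =>
    intro z pp best idx hz hzs
    have hz' : 0 ≤ z' := hzs z' (List.mem_cons_self ..)
    have hrest : ∀ y ∈ rest, 0 ≤ y := fun y hy => hzs y (List.mem_cons_of_mem _ hy)
    simp only [goA, goB]
    by_cases hlen : (z - pp - 1) + 1 + (z' - z - 1) > best
    · simp only [if_pos hlen, if_pos (show z ≥ 0 by omega)]
      exact ih z' z ((z - pp - 1) + 1 + (z' - z - 1)) z hz' hrest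
    · simp only [if_neg hlen, if_pos (show z ≥ 0 by omega)]
      exact ih z' z best idx hz' hrest

theorem main_eq (array : List Int) :
    longestStreakOfAdjacentOnes array = longestStreakOfAdjacentOnes_alt array := by
  unfold longestStreakOfAdjacentOnes longestStreakOfAdjacentOnes_alt
  rw [stack_eq array 0 [], bfold_eq array 0]
  simp only [List.nil_append]
  have ha := afold_eq (zIdx array 0) (array.length : Int) (zIdx array 0).length 0 (by omega) (-1, 0)
  simp only [List.drop_zero, Nat.cast_zero] at ha
  rw [ha]
  cases hzs : zIdx array 0 with
  | nil => simp [goA, goB]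

  | cons p rest =>
    have hp : 0 ≤ p := by
      have := zIdx_le array 0 p (by rw [hzs]; exact List.mem_cons_self ..)
      omega
    have hrest : ∀ y ∈ rest, 0 ≤ y := by
      intro y hy
      have := zIdx_le array 0 y (by rw [hzs]; exact List.mem_cons_of_mem _ hy)
      omega
    have hc := corr (array.length : Int) rest p (-1) 0 (-1) hp hrest
    exact hc

-- ===== VERDICT (by name: the statement is the Claim_ definition above) =====
theorem longestStreakOfAdjacentOnes_spec : Claim_equal_longestStreakOfAdjacentOnes := by
  intro array _
  exact main_eq array
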